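-- pv_equiv track=rewrite | github.com/KeiDamy/LZ | lz.py | incremental_decomposition
-- ===== SOURCE A (Python) =====
-- def incremental_decomposition(input_strings):
--     dictionary = []
--     temp = []
--
--     for i in range(len(input_strings)):
--         if len(temp) == 0:
--             temp.append(input_strings[i])
--         else:
--             if not temp in dictionary:
--                 dictionary.append(temp)
--                 temp = []
--             temp.append(input_strings[i])
--     dictionary.append(temp)
--     return dictionary
-- ===== SOURCE B (Python) =====
-- def incremental_decomposition(input_strings):
--     # Explicit LZ78 prefix trie: integer-numbered nodes with a (node,symbol)->node
--     # transition table; descend while a child exists, otherwise emit the phrase,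
--     # add a fresh child node and restart at the root.
--     children = {}          # (node_id, symbol) -> child node_id
--     next_id = 1
--     node = 0               # root
--     path = []
--     phrases = []
--     for ch in input_strings:
--         child = children.get((node, ch))
--         if child is not None:
--             node = child
--             path.append(ch)
--         else:
--             children[(node, ch)] = next_id
--             next_id += 1
--             phrases.append(path + [ch])
--             node, path = 0, []
--     if path or not input_strings:
--         phrases.append(path)
--     return phrases
-- ===== Notes on version B (the rewrite author's own statement) =====
-- stated objective: faster
-- what changed: Replaces A's list of emitted phrases probed by a linear list-equality membership scan per character with an explicit LZ78 prefix trie: integer-numbered nodes and a (node,symbol)->node transition table; B descends the trie per symbol and emits/adds a fresh child on a failed transition, restarting at the root.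
import Mathlib
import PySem

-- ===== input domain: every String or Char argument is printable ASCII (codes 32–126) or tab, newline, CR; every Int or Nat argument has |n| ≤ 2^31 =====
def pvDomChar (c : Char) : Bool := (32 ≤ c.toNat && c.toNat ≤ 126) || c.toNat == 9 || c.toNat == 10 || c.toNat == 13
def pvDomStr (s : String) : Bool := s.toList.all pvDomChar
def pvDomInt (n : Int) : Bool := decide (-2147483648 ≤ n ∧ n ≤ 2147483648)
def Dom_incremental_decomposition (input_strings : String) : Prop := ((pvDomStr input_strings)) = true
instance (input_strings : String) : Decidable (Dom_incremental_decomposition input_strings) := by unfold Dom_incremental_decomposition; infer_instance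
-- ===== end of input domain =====

-- B replaces A's per-character linear membership scan over the phrase list by an explicit LZ78
-- prefix trie (numbered nodes, a (node,symbol)->node transition table); return values are
-- proved equal on all inputs.

-- ===== PORT A =====
-- loop body over the characters with state (dictionary, temp); the 1-char strings input_strings[i]
-- are String.ofList [c]
def pvStepA (st : List (List String) × List String) (c : Char) : List (List String) × List String :=
  if st.2.length = 0 then (st.1, st.2 ++ [String.ofList [c]])
  else
    let st' := if st.2 ∈ st.1 then st else (st.1 ++ [st.2], ([] : List String))
    (st'.1, st'.2 ++ [String.ofList [c]])

def incremental_decomposition (input_strings : String) : List (List String) :=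
  let st := input_strings.toList.foldl pvStepA ([], [])
  st.1 ++ [st.2]

-- ===== PORT B =====
-- trie state: (children : transition table (node,symbol) -> node, next_id, node, path, phrases);
-- Python's 1-char symbol strings are the Chars of the input, path holds 1-char Strings as in B
def pvStepT
    (st : PySem.Dict (Int × Char) Int × Int × Int × List String × List (List String))
    (c : Char) :
    PySem.Dict (Int × Char) Int × Int × Int × List String × List (List String) :=
  match st with
  | (children, nextId, node, path, phrases) =>
    match children.get? (node, c) with
    | some child => (children, nextId, child, path ++ [String.ofList [c]], phrases)
    | none =>
        (children.insert (node, c) nextId, nextId + 1, 0, [],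
         phrases ++ [path ++ [String.ofList [c]]])

def incremental_decomposition_alt (input_strings : String) : List (List String) :=
  let st := input_strings.toList.foldl pvStepT (PySem.Dict.empty, 1, 0, [], [])
  if st.2.2.2.1 ≠ [] ∨ input_strings.toList = [] then st.2.2.2.2 ++ [st.2.2.2.1] else st.2.2.2.2

-- ===== PRECONDITION & SPEC =====
def Spec_incremental_decomposition (input_strings : String) (out : List (List String)) : Prop := out = incremental_decomposition_alt input_strings
instance (input_strings : String) (out : List (List String)) : Decidable (Spec_incremental_decomposition input_strings out) := by unfold Spec_incremental_decomposition; infer_instance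

-- ===== CLAIM (what is proved, stated in full; the proofs are below) =====
def Claim_equal_incremental_decomposition : Prop := ∀ (input_strings : String), Dom_incremental_decomposition input_strings → Spec_incremental_decomposition input_strings (incremental_decomposition input_strings)

-- ===== LEMMAS AND PROOFS =====

-- the phrase (list of 1-char strings) corresponding to a list of characters
def pvPhrase (cs : List Char) : List String := cs.map (fun ch => String.ofList [ch])

theorem pvPhrase_injective : Function.Injective pvPhrase := by
  intro a b h
  refine List.map_injective_iff.mpr ?_ h
  intro x y hxy
  have := congrArg String.toList hxy
  simpa [String.toList_ofList] using this

-- proof-only intermediate program: the same parse driven by a SET of already-seen prefixes,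
-- with state (seen, buf, phrases); it bridges A's delayed-emit list scan and B's trie
def pvStepS (st : PySem.Set (List Char) × List Char × List (List String)) (c : Char) :
    PySem.Set (List Char) × List Char × List (List String) :=
  let cand := st.2.1 ++ [c]
  if cand ∈ st.1 then (st.1, cand, st.2.2)
  else (PySem.Set.add st.1 cand, [], st.2.2 ++ [pvPhrase cand])

def pvAltS (input_strings : String) : List (List String) :=
  let st := input_strings.toList.foldl pvStepS (PySem.Set.ofList [], [], [])
  if st.2.1 ≠ [] ∨ input_strings.toList = [] then st.2.2 ++ [pvPhrase st.2.1] else st.2.2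

-- ---- A = S ----

-- the coupling invariant between A's state (dictionary, temp) = (a.1, a.2) and
-- S's state (seen, buf, phrases) = (b.1, b.2.1, b.2.2), for states after ≥ 1 character
def pvInv (a : List (List String) × List String)
    (b : PySem.Set (List Char) × List Char × List (List String)) : Prop :=
  (∀ q : List Char, q ∈ b.1 ↔ pvPhrase q ∈ b.2.2) ∧
  ((b.2.1 ≠ [] ∧ a.2 = pvPhrase b.2.1 ∧ a.1 = b.2.2 ∧ b.2.1 ∈ b.1) ∨
   (b.2.1 = [] ∧ ∃ q : List Char, q ≠ [] ∧ a.2 = pvPhrase q ∧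
      b.2.2 = a.1 ++ [pvPhrase q] ∧ pvPhrase q ∉ a.1))

theorem pvSeen_step (b : PySem.Set (List Char) × List Char × List (List String))
    (hseen : ∀ q : List Char, q ∈ b.1 ↔ pvPhrase q ∈ b.2.2) (c : Char)
    (_hc : b.2.1 ++ [c] ∉ b.1) (r : List Char) :
    r ∈ PySem.Set.add b.1 (b.2.1 ++ [c]) ↔ pvPhrase r ∈ b.2.2 ++ [pvPhrase (b.2.1 ++ [c])] := by
  rw [PySem.Set.mem_add, List.mem_append, List.mem_singleton, hseen]
  exact or_congr Iff.rfl ⟨fun h => h ▸ rfl, fun h => pvPhrase_injective h⟩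

theorem pvInv_step (a : List (List String) × List String)
    (b : PySem.Set (List Char) × List Char × List (List String))
    (h : pvInv a b) (c : Char) : pvInv (pvStepA a c) (pvStepS b c) := by
  obtain ⟨hseen, hcase⟩ := h
  rcases hcase with ⟨hb, ht, hd, hmem⟩ | ⟨hb, q, hq, ht, hph, hnin⟩
  · -- buf ≠ []: temp = pvPhrase buf ∈ dictionary, so A extends temp
    have htlen : ¬ a.2.length = 0 := by simpa [ht, pvPhrase] using hb
    have htin : a.2 ∈ a.1 := by rw [ht, hd]; exact (hseen b.2.1).mp hmem
    by_cases hc : b.2.1 ++ [c] ∈ b.1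
    · -- cand already seen: S extends buf, neither emits
      refine ⟨?_, Or.inl ?_⟩ <;>
        simp only [pvStepS, pvStepA, if_pos hc, if_neg htlen, if_pos htin]
      · exact hseen
      · exact ⟨by simp, by simp [ht, pvPhrase], hd, hc⟩
    · -- cand new: S emits it now, A will at the next step / final append
      refine ⟨?_, Or.inr ?_⟩ <;>
        simp only [pvStepS, pvStepA, if_neg hc, if_neg htlen, if_pos htin]
      · exact pvSeen_step b hseen c hc
      · refine ⟨trivial, b.2.1 ++ [c], by simp, by simp [ht, pvPhrase], by rw [hd], ?_⟩
        intro hcon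
        exact hc ((hseen _).mpr (hd ▸ hcon))
  · -- buf = []: temp = pvPhrase q ∉ dictionary, so A emits temp and restarts with [c]
    have htlen : ¬ a.2.length = 0 := by simpa [ht, pvPhrase] using hq
    have hnotin : a.2 ∉ a.1 := by rw [ht]; exact hnin
    by_cases hc : b.2.1 ++ [c] ∈ b.1
    · refine ⟨?_, Or.inl ?_⟩ <;>
        simp only [pvStepS, pvStepA, if_pos hc, if_neg htlen, if_neg hnotin]
      · exact hseen
      · exact ⟨by simp [hb], by simp [hb, pvPhrase], by rw [hph, ht], hc⟩
    · refine ⟨?_, Or.inr ?_⟩ <;>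
        simp only [pvStepS, pvStepA, if_neg hc, if_neg htlen, if_neg hnotin]
      · exact pvSeen_step b hseen c hc
      · refine ⟨trivial, b.2.1 ++ [c], by simp, by simp [hb, pvPhrase], by rw [hph, ht], ?_⟩
        intro hcon
        exact hc ((hseen _).mpr (by rw [hph, ← ht]; exact hcon))

theorem pvInv_foldl (cs : List Char) (a : List (List String) × List String)
    (b : PySem.Set (List Char) × List Char × List (List String)) (h : pvInv a b) :
    pvInv (cs.foldl pvStepA a) (cs.foldl pvStepS b) := by
  induction cs generalizing a b with
  | nil => exact h
  | cons c cs ih => exact ih _ _ (pvInv_step a b h c)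

theorem pvInv_init (c : Char) :
    pvInv (pvStepA ([], []) c) (pvStepS (PySem.Set.ofList [], [], []) c) := by
  have hA : pvStepA ([], []) c = ([], [String.ofList [c]]) := rfl
  have hB : pvStepS (PySem.Set.ofList [], [], []) c = ([[c]], [], [pvPhrase [c]]) := rfl
  rw [hA, hB]
  refine ⟨?_, Or.inr ⟨rfl, [c], by simp, rfl, rfl, by simp⟩⟩
  intro q
  simp only [List.mem_singleton]
  exact ⟨fun h => h ▸ rfl, fun h => pvPhrase_injective h⟩

theorem pv_A_eq_S (s : String) :
    incremental_decomposition s = pvAltS s := by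
  unfold incremental_decomposition pvAltS
  cases hcs : s.toList with
  | nil => simp [pvPhrase]
  | cons c cs =>
    simp only [List.foldl_cons]
    obtain ⟨hseen, hcase⟩ := pvInv_foldl cs _ _ (pvInv_init c)
    rcases hcase with ⟨hbuf, ht, hd, _⟩ | ⟨hbuf, q, hq, ht, hph, _⟩
    · rw [if_pos (Or.inl hbuf), ht, hd]
    · have hcond : ¬ ((cs.foldl pvStepS (pvStepS (PySem.Set.ofList [], [], []) c)).2.1 ≠ []
          ∨ c :: cs = []) := by push Not; exact ⟨hbuf, by simp⟩
      rw [if_neg hcond, hph, ht]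

-- ---- S = T (trie) ----

-- the coupling invariant between the trie state t = (children, nextId, node, path, phrases)
-- and S's state s = (seen, buf, phrases): ρ numbers the seen prefixes (and [] as the root 0),
-- the transition table is exactly the child relation on them, ids below nextId
def pvInvT (t : PySem.Dict (Int × Char) Int × Int × Int × List String × List (List String))
    (s : PySem.Set (List Char) × List Char × List (List String)) : Prop :=
  t.2.2.2.1 = pvPhrase s.2.1 ∧ t.2.2.2.2 = s.2.2 ∧
  ∃ ρ : List Char → Int,
    ρ [] = 0 ∧
    t.2.2.1 = ρ s.2.1 ∧
    (s.2.1 = [] ∨ s.2.1 ∈ s.1) ∧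
    (∀ p, (p = [] ∨ p ∈ s.1) → ρ p < t.2.1) ∧
    (∀ p q, (p = [] ∨ p ∈ s.1) → (q = [] ∨ q ∈ s.1) → ρ p = ρ q → p = q) ∧
    (∀ p c, (p = [] ∨ p ∈ s.1) →
        t.1.get? (ρ p, c) = if p ++ [c] ∈ s.1 then some (ρ (p ++ [c])) else none) ∧
    (∀ m c, (∀ p, (p = [] ∨ p ∈ s.1) → ρ p ≠ m) → t.1.get? (m, c) = none) ∧
    (∀ q c, q ++ [c] ∈ s.1 → q = [] ∨ q ∈ s.1)

theorem pvInvT_step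
    (t : PySem.Dict (Int × Char) Int × Int × Int × List String × List (List String))
    (s : PySem.Set (List Char) × List Char × List (List String))
    (h : pvInvT t s) (c : Char) : pvInvT (pvStepT t c) (pvStepS s c) := by
  obtain ⟨ch, nid, nd, pa, ou⟩ := t
  obtain ⟨seen, buf, phr⟩ := s
  obtain ⟨hpath, hout, ρ, hρ0, hnode, hbuf, hlt, hinj, htrans, hfresh, hclose⟩ := h
  simp only at hpath hout hnode hbuf hlt hinj htrans hfresh hclose
  have hg := htrans buf c hbuf
  by_cases hc : buf ++ [c] ∈ seen
  · -- transition exists; both descend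
    rw [if_pos hc] at hg
    have : pvStepT (ch, nid, nd, pa, ou) c
        = (ch, nid, ρ (buf ++ [c]), pa ++ [String.ofList [c]], ou) := by
      simp [pvStepT, hnode, hg]
    rw [this]
    simp only [pvStepS, if_pos hc]
    refine ⟨by simp [hpath, pvPhrase], hout, ρ, hρ0, rfl, Or.inr hc, hlt, hinj, htrans,
      hfresh, hclose⟩
  · -- no transition: both emit; ρ' extends ρ with the new phrase ↦ nid
    rw [if_neg hc] at hg
    have hstep : pvStepT (ch, nid, nd, pa, ou) c
        = (ch.insert (nd, c) nid, nid + 1, 0, [], ou ++ [pa ++ [String.ofList [c]]]) := by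
      rw [hnode]; simp [pvStepT, hg]
    rw [hstep]
    simp only [pvStepS, if_neg hc]
    have hcand_ne : buf ++ [c] ≠ [] := by simp
    have hnid_pos : (0 : Int) < nid := by
      have := hlt [] (Or.inl rfl); omega
    have hmem' : ∀ p, (p = [] ∨ p ∈ PySem.Set.add seen (buf ++ [c])) →
        p = buf ++ [c] ∨ (p ≠ buf ++ [c] ∧ (p = [] ∨ p ∈ seen)) := by
      intro p hp
      by_cases hpc : p = buf ++ [c]
      · exact Or.inl hpc
      · refine Or.inr ⟨hpc, ?_⟩
        rcases hp with h | h
        · exact Or.inl h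
        · rcases (PySem.Set.mem_add _ _ _).mp h with h' | h'
          · exact Or.inr h'
          · exact absurd h' hpc
    refine ⟨by simp [pvPhrase], by simp [hout, hpath, pvPhrase],
      fun p => if p = buf ++ [c] then nid else ρ p, ?_, ?_, Or.inl rfl, ?_, ?_, ?_, ?_, ?_⟩
    · -- ρ' [] = 0
      dsimp only
      rw [if_neg (Ne.symm hcand_ne)]; exact hρ0
    · -- node' = 0 = ρ' []
      dsimp only
      rw [if_neg (Ne.symm hcand_ne)]; exact hρ0.symm
    · -- bounds
      intro p hp
      dsimp only
      rcases hmem' p hp with hpc | ⟨hpc, hpold⟩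
      · rw [if_pos hpc]; omega
      · rw [if_neg hpc]
        have := hlt p hpold; omega
    · -- injectivity
      intro p q hp hq hpq
      dsimp only at hpq
      rcases hmem' p hp with hpc | ⟨hpc, hpold⟩ <;> rcases hmem' q hq with hqc | ⟨hqc, hqold⟩
      · rw [hpc, hqc]
      · rw [if_pos hpc, if_neg hqc] at hpq
        have := hlt q hqold; omega
      · rw [if_neg hpc, if_pos hqc] at hpq
        have := hlt p hpold; omega
      · rw [if_neg hpc, if_neg hqc] at hpq
        exact hinj p q hpold hqold hpq
    · -- transition table characterises children in the extended trie
      intro p c' hp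
      dsimp only
      rcases hmem' p hp with hpc | ⟨hpc, hpold⟩
      · -- the fresh node: no children, and no extension of the new phrase is seen yet
        rw [if_pos hpc]
        have hkey_ne : ((nid : Int), c') ≠ (nd, c) := by
          have := hlt buf hbuf
          intro he
          have h1 : (nid : Int) = nd := congrArg Prod.fst he
          rw [hnode] at h1; omega
        rw [PySem.Dict.get?_insert, if_neg hkey_ne]
        have hnomatch : ¬ p ++ [c'] ∈ PySem.Set.add seen (buf ++ [c]) := by
          intro hm
          rcases (PySem.Set.mem_add _ _ _).mp hm with hm | hm
          · rcases hclose _ _ hm with h' | h'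
            · exact absurd (hpc ▸ h') hcand_ne
            · exact hc (hpc ▸ h')
          · have := congrArg List.length hm
            rw [hpc] at this; simp at this
        rw [if_neg hnomatch]
        exact hfresh nid c' (by
          intro r hr he
          have := hlt r hr
          omega)
      · rw [if_neg hpc]
        by_cases hkey : ((ρ p : Int), c') = (nd, c)
        · -- this is exactly the inserted edge: p = buf (by injectivity), c' = c
          have h1 : ρ p = nd := congrArg Prod.fst hkey
          have h2 : c' = c := congrArg Prod.snd hkey
          have hpb : p = buf := hinj p buf hpold hbuf (by rw [h1, hnode])
          rw [PySem.Dict.get?_insert, if_pos hkey]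
          have hm : p ++ [c'] ∈ PySem.Set.add seen (buf ++ [c]) := by
            rw [hpb, h2]; exact (PySem.Set.mem_add _ _ _).mpr (Or.inr rfl)
          rw [if_pos hm, if_pos (by rw [hpb, h2])]
        · rw [PySem.Dict.get?_insert, if_neg hkey, htrans p c' hpold]
          by_cases hm : p ++ [c'] ∈ seen
          · have hm' : p ++ [c'] ∈ PySem.Set.add seen (buf ++ [c]) :=
              (PySem.Set.mem_add _ _ _).mpr (Or.inl hm)
            have hne : p ++ [c'] ≠ buf ++ [c] := fun he => hc (he ▸ hm)
            rw [if_pos hm, if_pos hm', if_neg hne]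
          · have hm' : ¬ p ++ [c'] ∈ PySem.Set.add seen (buf ++ [c]) := by
              intro hx
              rcases (PySem.Set.mem_add _ _ _).mp hx with hx | hx
              · exact hm hx
              · rcases List.append_inj' hx rfl with ⟨he1, he2⟩
                apply hkey
                have he2' : c' = c := by simpa using he2
                rw [he1, hnode, he2']
            rw [if_neg hm, if_neg hm']
    · -- ids outside ρ'(seen' ∪ {[]}) have no outgoing edges
      intro m c' hm
      have hold : ∀ p, (p = [] ∨ p ∈ seen) → ρ p ≠ m := by
        intro p hp
        have hpne : p ≠ buf ++ [c] := by
          rcases hp with h | h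
          · exact h ▸ hcand_ne.symm
          · exact fun he => hc (he ▸ h)
        have := hm p (by
          rcases hp with h | h
          · exact Or.inl h
          · exact Or.inr ((PySem.Set.mem_add _ _ _).mpr (Or.inl h)))
        dsimp only at this
        rwa [if_neg hpne] at this
      have hkey : ((m : Int), c') ≠ (nd, c) := by
        intro he
        have h1 : (m : Int) = nd := congrArg Prod.fst he
        exact hold buf hbuf (by rw [← hnode]; exact h1.symm)
      rw [PySem.Dict.get?_insert, if_neg hkey]
      exact hfresh m c' hold
    · -- seen' is closed under removing the last symbol
      intro q c' hq
      rcases (PySem.Set.mem_add _ _ _).mp hq with hq | hq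
      · rcases hclose q c' hq with h | h
        · exact Or.inl h
        · exact Or.inr ((PySem.Set.mem_add _ _ _).mpr (Or.inl h))
      · rcases List.append_inj' hq rfl with ⟨he1, _⟩
        rcases hbuf with h | h
        · exact Or.inl (he1.trans h)
        · exact Or.inr ((PySem.Set.mem_add _ _ _).mpr (Or.inl (he1 ▸ h)))

theorem pvInvT_foldl (cs : List Char)
    (t : PySem.Dict (Int × Char) Int × Int × Int × List String × List (List String))
    (s : PySem.Set (List Char) × List Char × List (List String)) (h : pvInvT t s) :
    pvInvT (cs.foldl pvStepT t) (cs.foldl pvStepS s) := by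
  induction cs generalizing t s with
  | nil => exact h
  | cons c cs ih => exact ih _ _ (pvInvT_step t s h c)

theorem pvInvT_init :
    pvInvT (PySem.Dict.empty, 1, 0, [], []) (PySem.Set.ofList [], [], []) := by
  refine ⟨rfl, rfl, fun _ => 0, rfl, rfl, Or.inl rfl, ?_, ?_, ?_, ?_, ?_⟩
  · intro p _; norm_num
  · intro p q hp hq _
    rcases hp with hp | hp
    · rcases hq with hq | hq
      · rw [hp, hq]
      · simp [PySem.Set.ofList] at hq
    · simp [PySem.Set.ofList] at hp
  · intro p c _
    have : ¬ p ++ [c] ∈ (PySem.Set.ofList ([] : List (List Char))) := by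
      simp [PySem.Set.ofList]
    rw [if_neg this]
    exact PySem.Dict.get?_empty _
  · intro m c _; exact PySem.Dict.get?_empty _
  · intro q c hq; simp [PySem.Set.ofList] at hq

theorem pv_S_eq_T (s : String) : pvAltS s = incremental_decomposition_alt s := by
  unfold pvAltS incremental_decomposition_alt
  obtain ⟨hpath, hout, _⟩ :=
    pvInvT_foldl s.toList (PySem.Dict.empty, 1, 0, [], []) (PySem.Set.ofList [], [], [])
      pvInvT_init
  have hiff : (s.toList.foldl pvStepT (PySem.Dict.empty, 1, 0, [], [])).2.2.2.1 = []
      ↔ (s.toList.foldl pvStepS (PySem.Set.ofList [], [], [])).2.1 = [] := by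
    rw [hpath]; simp [pvPhrase]
  by_cases hb : (s.toList.foldl pvStepS (PySem.Set.ofList [], [], [])).2.1 = []
  · by_cases he : s.toList = []
    · rw [if_pos (Or.inr he), if_pos (Or.inr he), hout, hpath]
    · rw [if_neg (by push Not; exact ⟨hb, he⟩),
        if_neg (by push Not; exact ⟨hiff.mpr hb, he⟩), hout]
  · rw [if_pos (Or.inl hb), if_pos (Or.inl (fun he => hb (hiff.mp he))), hout, hpath]

theorem pv_main (s : String) :
    incremental_decomposition s = incremental_decomposition_alt s :=
  (pv_A_eq_S s).trans (pv_S_eq_T s)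

-- ===== VERDICT (by name: the statement is the Claim_ definition above) =====
theorem incremental_decomposition_spec : Claim_equal_incremental_decomposition := by
  intro s _
  exact pv_main s
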